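-- pv_equiv track=rewrite | github.com/bschnitz/recipes | recipes/core/parsers/meal_master.py | merge_ingredient_columns
-- ===== SOURCE A (Python) =====
-- def merge_ingredient_columns(columns):
--     ingredient_lines = columns[0] + columns[1]
--     ingredients = []
--     ingredient = ingredient_lines.pop(0)
--     for line in ingredient_lines:
--         if line.get('continuation'):
--             ingredient['ingredient'] += ' ' + line['continuation']
--         else:
--             ingredients.append(ingredient)
--             ingredient = line
--     ingredients.append(ingredient)
--     return ingredients
-- ===== SOURCE B (Python) =====
-- def merge_ingredient_columns(columns):
--     # Two-pass grouping: partition lines into continuation groups, then fold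
--     # each group's continuations onto its head dict (mutated in place, like A).
--     lines = columns[0] + columns[1]
--     groups = [[lines[0]]]
--     for line in lines[1:]:
--         if line.get('continuation'):
--             groups[-1].append(line)
--         else:
--             groups.append([line])
--     result = []
--     for group in groups:
--         head = group[0]
--         for cont in group[1:]:
--             head['ingredient'] += ' ' + cont['continuation']
--         result.append(head)
--     return result
-- ===== Notes on version B (the rewrite author's own statement) =====
-- stated objective: alternative
-- what changed: A's single left-to-right scan carrying a mutable 'current ingredient' is replaced by a two-pass decomposition: first partition the lines into continuation groups, then merge each group's continuations onto its head.
import Mathlib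
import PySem

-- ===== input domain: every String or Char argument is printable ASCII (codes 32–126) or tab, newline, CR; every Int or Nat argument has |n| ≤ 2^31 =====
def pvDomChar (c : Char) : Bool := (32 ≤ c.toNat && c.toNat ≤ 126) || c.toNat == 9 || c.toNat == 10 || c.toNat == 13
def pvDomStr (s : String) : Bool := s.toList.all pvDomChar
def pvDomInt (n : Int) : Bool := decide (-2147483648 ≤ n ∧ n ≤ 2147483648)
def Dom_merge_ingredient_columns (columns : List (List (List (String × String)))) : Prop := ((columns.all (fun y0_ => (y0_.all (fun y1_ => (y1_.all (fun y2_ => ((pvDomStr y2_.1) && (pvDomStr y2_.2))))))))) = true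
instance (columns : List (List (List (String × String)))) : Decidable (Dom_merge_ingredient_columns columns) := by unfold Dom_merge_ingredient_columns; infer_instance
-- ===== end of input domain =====

-- B (alternative): two-pass grouping — first partition the lines into continuation
-- groups, then merge each group onto its head — instead of A's single left-to-right
-- scan with a running "current ingredient". Both Pythons mutate the head dicts in
-- place; equivalence here is about the return value.

-- shared transliterations of the Python dict expressions both sources use
-- first-match assoc lookup = dict lookup (dicts have unique keys; Pre_ excludes duplicate-key lists)
def pvGet? (d : List (String × String)) (k : String) : Option String :=
  match d with
  | [] => none
  | (k', v) :: t => if k' = k then some v else pvGet? t k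

-- truthiness of line.get('continuation'): present with a non-empty value
def pvCont (line : List (String × String)) : Bool :=
  match pvGet? line "continuation" with
  | some s => !(s == "")
  | none => false

-- line['continuation'] (only evaluated when pvCont holds, so the key is present)
def pvContVal (line : List (String × String)) : String :=
  (pvGet? line "continuation").getD ""

-- d['ingredient'] += ' ' + s : update the (unique) 'ingredient' entry in place;
-- missing key = KeyError in Python, excluded by Pre_ (here: no-op)
def pvUpd (d : List (String × String)) (s : String) : List (String × String) :=
  match d with
  | [] => []
  | (k, v) :: t => if k = "ingredient" then (k, v ++ " " ++ s) :: t else (k, v) :: pvUpd t s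

-- ===== PORT A =====
-- the for-loop over ingredient_lines, state = (ingredient, ingredients)
def pvLoopA (ing : List (String × String)) (acc : List (List (String × String))) :
    List (List (String × String)) → List (List (String × String))
  | [] => acc ++ [ing]
  | l :: r =>
    if pvCont l then pvLoopA (pvUpd ing (pvContVal l)) acc r
    else pvLoopA l (acc ++ [ing]) r

def merge_ingredient_columns (columns : List (List (List (String × String)))) : List (List (String × String)) :=
  let ingredient_lines := (PySem.List.pyGet? columns 0).getD [] ++ (PySem.List.pyGet? columns 1).getD []
  match ingredient_lines with
  | [] => []            -- ingredient_lines.pop(0) raises IndexError: outside Pre_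
  | ing :: rest => pvLoopA ing [] rest

-- ===== PORT B =====
-- first pass step: append to groups[-1] or start a new group
def pvStepB (gs : List (List (List (String × String)))) (l : List (String × String)) :
    List (List (List (String × String))) :=
  if pvCont l then gs.dropLast ++ [(gs.getLast?.getD []) ++ [l]] else gs ++ [[l]]

-- second pass: head = group[0]; fold the continuations onto it
def pvMergeGroup (g : List (List (String × String))) : List (String × String) :=
  match g with
  | [] => []            -- groups are never empty
  | h :: t => t.foldl (fun hd c => pvUpd hd (pvContVal c)) h

def merge_ingredient_columns_alt (columns : List (List (List (String × String)))) : List (List (String × String)) :=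
  let lines := (PySem.List.pyGet? columns 0).getD [] ++ (PySem.List.pyGet? columns 1).getD []
  match lines with
  | [] => []            -- lines[0] raises IndexError: outside Pre_
  | h :: rest =>
    let groups := rest.foldl pvStepB [[h]]
    groups.map pvMergeGroup

-- ===== PRECONDITION & SPEC =====
-- Pre_ = exactly the inputs where Python A returns: at least two columns, at least one
-- line, each line a duplicate-key-free assoc list (a Python dict cannot have duplicate
-- keys), and every group head that is followed by a continuation line has an
-- 'ingredient' key (otherwise A raises KeyError; B raises the same KeyError there).
def Pre_merge_ingredient_columns (columns : List (List (List (String × String)))) : Prop :=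
  2 ≤ columns.length ∧
  (let lines := (PySem.List.pyGet? columns 0).getD [] ++ (PySem.List.pyGet? columns 1).getD []
   lines ≠ [] ∧
   (∀ l ∈ lines, (l.map Prod.fst).Nodup) ∧
   (∀ i ∈ List.range lines.length, i + 1 < lines.length →
      ((lines.getD (i+1) []).any (fun p => p.1 == "continuation" && !(p.2 == ""))) = true →
      (i = 0 ∨ ((lines.getD i []).any (fun p => p.1 == "continuation" && !(p.2 == ""))) = false) →
      "ingredient" ∈ (lines.getD i []).map Prod.fst))
instance (columns : List (List (List (String × String)))) : Decidable (Pre_merge_ingredient_columns columns) := by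
  unfold Pre_merge_ingredient_columns; infer_instance

def pvWitness_merge_ingredient_columns : (List (List (List (String × String)))) :=
  [[[("ingredient", "1 cup flour")]], [[("continuation", "sifted")], [("ingredient", "salt")]]]

def Spec_merge_ingredient_columns (columns : List (List (List (String × String)))) (out : List (List (String × String))) : Prop := out = merge_ingredient_columns_alt columns
instance (columns : List (List (List (String × String)))) (out : List (List (String × String))) : Decidable (Spec_merge_ingredient_columns columns out) := by unfold Spec_merge_ingredient_columns; infer_instance

-- ===== CLAIM (what is proved, stated in full; the proofs are below) =====
def Claim_equal_merge_ingredient_columns : Prop := ∀ (columns : List (List (List (String × String)))), Dom_merge_ingredient_columns columns → Pre_merge_ingredient_columns columns → Spec_merge_ingredient_columns columns (merge_ingredient_columns columns)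

-- ===== LEMMAS AND PROOFS =====

-- proof-only structural grouping: grp g r = the groups B's first pass produces from
-- current group g and remaining lines r
def pvGrp (g : List (List (String × String))) :
    List (List (String × String)) → List (List (List (String × String)))
  | [] => [g]
  | l :: r => if pvCont l then pvGrp (g ++ [l]) r else g :: pvGrp [l] r

theorem foldl_stepB_eq_grp (r : List (List (String × String)))
    (pre : List (List (List (String × String)))) (g : List (List (String × String))) :
    r.foldl pvStepB (pre ++ [g]) = pre ++ pvGrp g r := by
  induction r generalizing pre g with
  | nil => simp [pvGrp]
  | cons l r ih =>
    simp only [List.foldl_cons, pvStepB, pvGrp]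
    by_cases h : pvCont l
    · simp only [h, if_true]
      rw [List.dropLast_concat, List.getLast?_concat]
      simpa using ih pre (g ++ [l])
    · simp only [h, if_false, Bool.false_eq_true]
      rw [show (pre ++ [g]) ++ [[l]] = (pre ++ [g]) ++ [[l]] from rfl,
          ih (pre ++ [g]) [l]]
      simp

theorem loopA_eq_map_merge (r : List (List (String × String)))
    (acc : List (List (String × String)))
    (h : List (String × String)) (cs : List (List (String × String))) :
    pvLoopA (cs.foldl (fun hd c => pvUpd hd (pvContVal c)) h) acc r
      = acc ++ (pvGrp (h :: cs) r).map pvMergeGroup := by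
  induction r generalizing acc h cs with
  | nil => simp [pvLoopA, pvGrp, pvMergeGroup]
  | cons l r ih =>
    simp only [pvLoopA, pvGrp]
    by_cases hc : pvCont l
    · simp only [hc, if_true]
      have : pvUpd (cs.foldl (fun hd c => pvUpd hd (pvContVal c)) h) (pvContVal l)
          = (cs ++ [l]).foldl (fun hd c => pvUpd hd (pvContVal c)) h := by
        simp
      rw [this, ih acc h (cs ++ [l])]
      simp
    · simp only [hc, if_false, Bool.false_eq_true]
      have := ih (acc ++ [cs.foldl (fun hd c => pvUpd hd (pvContVal c)) h]) l []
      simp only [List.foldl_nil] at this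
      rw [this]
      simp [pvMergeGroup]

-- ===== VERDICT (by name: the statement is the Claim_ definition above) =====
theorem merge_ingredient_columns_spec : Claim_equal_merge_ingredient_columns := by
  intro columns _ _
  unfold Spec_merge_ingredient_columns merge_ingredient_columns merge_ingredient_columns_alt
  cases h : (PySem.List.pyGet? columns 0).getD [] ++ (PySem.List.pyGet? columns 1).getD [] with
  | nil => rfl
  | cons hd rest =>
    simp only []
    have hA := loopA_eq_map_merge rest [] hd []
    simp only [List.foldl_nil, List.nil_append] at hA
    have hB := foldl_stepB_eq_grp rest [] [hd]
    simp only [List.nil_append] at hB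
    rw [hA, hB]
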